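-- pv_equiv track=rewrite | github.com/James-Tremblay/jmu-cs452-final-project | reduced solution/reduction.py | reduce_to_independent_set
-- ===== SOURCE A (Python) =====
-- def reduce_to_independent_set(n, c, clauses):
--     """
--     Reduces Max 3-SAT to Maximum Independent Set (MIS).
--
--     From the problem description:
--     The graph G contains exactly 3k vertices (where k=c is the number of clauses).
--     Two vertices in G are connected by an edge if:
--     1. They correspond to literals in the SAME clause (forming a triangle per clause).
--     2. They correspond to a variable and its inverse (contradictory literals).
--
--     Runtime: O(c^2) where c is the number of clauses.
--     Returns (num_vertices, edges)
--     """
--     edges = []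
--     num_vertices = 3 * c
--
--     # Flat list of literals with their clause index
--     # List of (clause_idx, literal_value)
--     flat_literals = []
--     for i, clause in enumerate(clauses):
--         for lit in clause:
--             flat_literals.append((i, lit))
--
--     # Build edges
--     # Iterate over all pairs of vertices
--     for i in range(len(flat_literals)):
--         for j in range(i + 1, len(flat_literals)):
--             c1_idx, l1 = flat_literals[i]
--             c2_idx, l2 = flat_literals[j]
--
--             is_connected = False
--
--             # Condition 1: Literals in the SAME clause
--             if c1_idx == c2_idx:
--                 is_connected = True
--
--             # Condition 2: Variable and its inverse (Contradictory)
--             # i.e. l1 == -l2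
--             elif l1 == -l2:
--                 is_connected = True
--
--             if is_connected:
--                 # Add edge (1-based indices)
--                 u = i + 1
--                 v = j + 1
--                 edges.append((u, v))
--
--     return num_vertices, edges
-- ===== SOURCE B (Python) =====
-- def reduce_to_independent_set(n, c, clauses):
--     # Flatten once, index literal positions by value, then emit each vertex's
--     # same-clause edges (a contiguous range) and contradictory edges (group
--     # lookup of -lit restricted to later clauses); no pairwise scan.
--     flat = []
--     for i, clause in enumerate(clauses):
--         for lit in clause:
--             flat.append((i, lit))
--     pos = {}
--     for j, (_ci, lit) in enumerate(flat):
--         pos.setdefault(lit, []).append(j)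
--     edges = []
--     start = 0
--     for clause in clauses:
--         end = start + len(clause)
--         for t in range(len(clause)):
--             i = start + t
--             lit = clause[t]
--             for j in range(i + 1, end):
--                 edges.append((i + 1, j + 1))
--             for j in pos.get(-lit, []):
--                 if j >= end:
--                     edges.append((i + 1, j + 1))
--         start = end
--     return 3 * c, edges
-- ===== Notes on version B (the rewrite author's own statement) =====
-- stated objective: faster
-- what changed: B replaces A's all-pairs O(m^2) scan over the flattened literal list by building a dictionary from literal value to its positions once, then emitting each vertex's same-clause edges as a contiguous index range and its contradictory edges by looking up the group of its negated literal restricted to later clauses.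
import Mathlib
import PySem

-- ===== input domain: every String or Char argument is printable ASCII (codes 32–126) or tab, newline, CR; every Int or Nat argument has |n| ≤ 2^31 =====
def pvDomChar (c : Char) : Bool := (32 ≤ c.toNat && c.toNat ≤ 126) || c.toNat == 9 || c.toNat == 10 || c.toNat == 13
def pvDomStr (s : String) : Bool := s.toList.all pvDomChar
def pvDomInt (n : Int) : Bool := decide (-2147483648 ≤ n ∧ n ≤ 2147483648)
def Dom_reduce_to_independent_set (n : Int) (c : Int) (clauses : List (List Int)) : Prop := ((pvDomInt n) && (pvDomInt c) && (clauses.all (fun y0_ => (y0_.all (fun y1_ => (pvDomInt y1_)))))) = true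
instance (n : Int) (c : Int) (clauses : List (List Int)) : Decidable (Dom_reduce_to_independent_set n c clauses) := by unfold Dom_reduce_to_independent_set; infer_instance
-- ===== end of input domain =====

-- B replaces A's all-pairs O(m^2) scan by indexing literal positions once and emitting,
-- per vertex, its same-clause range and the group of its negated literal (objective: faster).

-- ===== PORT A =====
def reduce_to_independent_set (n : Int) (c : Int) (clauses : List (List Int)) : Int × (List (Int × Int)) :=
  let num_vertices := 3 * c
  let flat_literals := (PySem.List.enumerate clauses).foldl
    (fun acc ic => ic.2.foldl (fun acc2 lit => acc2 ++ [(ic.1, lit)]) acc) []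
  let m : Int := PySem.List.len flat_literals
  let edges := (PySem.List.pyRange 0 m 1).foldl (fun ed i =>
    (PySem.List.pyRange (i + 1) m 1).foldl (fun ed2 j =>
      let p1 := PySem.List.pyGetD flat_literals i ((0 : Int), (0 : Int))
      let p2 := PySem.List.pyGetD flat_literals j ((0 : Int), (0 : Int))
      let is_connected := if p1.1 = p2.1 then true else if p1.2 = -p2.2 then true else false
      if is_connected then ed2 ++ [(i + 1, j + 1)] else ed2) ed) ([] : List (Int × Int))
  (num_vertices, edges)

-- ===== PORT B =====
def reduce_to_independent_set_alt (n : Int) (c : Int) (clauses : List (List Int)) : Int × (List (Int × Int)) :=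
  let flat := (PySem.List.enumerate clauses).foldl
    (fun acc ic => ic.2.foldl (fun acc2 lit => acc2 ++ [(ic.1, lit)]) acc) []
  let pos := (PySem.List.enumerate flat).foldl
    (fun d jp => d.modify jp.2.2 ([] : List Int) (fun l => l ++ [jp.1])) PySem.Dict.empty
  let res := clauses.foldl (fun se clause =>
    let start := se.1
    let endd := start + PySem.List.len clause
    let edges := (PySem.List.pyRange 0 (PySem.List.len clause) 1).foldl (fun ed t =>
      let i := start + t
      let lit := PySem.List.pyGetD clause t 0
      let ed1 := (PySem.List.pyRange (i + 1) endd 1).foldl (fun e j => e ++ [(i + 1, j + 1)]) ed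
      (pos.getD (-lit) []).foldl (fun e j => if j ≥ endd then e ++ [(i + 1, j + 1)] else e) ed1) se.2
    (endd, edges)) ((0 : Int), ([] : List (Int × Int)))
  (3 * c, res.2)

-- ===== PRECONDITION & SPEC =====
def Spec_reduce_to_independent_set (n : Int) (c : Int) (clauses : List (List Int)) (out : Int × (List (Int × Int))) : Prop := out = reduce_to_independent_set_alt n c clauses
instance (n : Int) (c : Int) (clauses : List (List Int)) (out : Int × (List (Int × Int))) : Decidable (Spec_reduce_to_independent_set n c clauses out) := by unfold Spec_reduce_to_independent_set; infer_instance

-- ===== CLAIM (what is proved, stated in full; the proofs are below) =====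
def Claim_equal_reduce_to_independent_set : Prop := ∀ (n : Int) (c : Int) (clauses : List (List Int)), Dom_reduce_to_independent_set n c clauses → Spec_reduce_to_independent_set n c clauses (reduce_to_independent_set n c clauses)

-- ===== LEMMAS AND PROOFS =====

-- the flat literal list with clause indices, clause counter starting at k
def pvEnumFlat (cs : List (List Int)) (k : Int) : List (Int × Int) :=
  match cs with
  | [] => []
  | cl :: t => cl.map (fun l => (k, l)) ++ pvEnumFlat t (k + 1)

-- A's connection test between positions i and j of flat
def pvCond (flat : List (Int × Int)) (i j : Int) : Bool :=
  let p1 := PySem.List.pyGetD flat i ((0 : Int), (0 : Int))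
  let p2 := PySem.List.pyGetD flat j ((0 : Int), (0 : Int))
  if p1.1 = p2.1 then true else if p1.2 = -p2.2 then true else false

-- A's edges emitted for left endpoint i
def pvAIn (flat : List (Int × Int)) (m i : Int) : List (Int × Int) :=
  ((PySem.List.pyRange (i + 1) m 1).filter (fun j => pvCond flat i j)).map (fun j => (i + 1, j + 1))

-- B's edges emitted for one clause starting at offset s
def pvBClause (pos : PySem.Dict Int (List Int)) (s : Int) (cl : List Int) : List (Int × Int) :=
  (PySem.List.pyRange 0 (PySem.List.len cl) 1).flatMap (fun t =>
    (PySem.List.pyRange (s + t + 1) (s + PySem.List.len cl) 1).map (fun j => (s + t + 1, j + 1)) ++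
    ((pos.getD (-(PySem.List.pyGetD cl t 0)) []).filter (fun j => decide (j ≥ s + PySem.List.len cl))).map
      (fun j => (s + t + 1, j + 1)))

-- B's edges for a list of clauses starting at offset s
def pvBAll (pos : PySem.Dict Int (List Int)) (s : Int) (cs : List (List Int)) : List (Int × Int) :=
  match cs with
  | [] => []
  | cl :: t => pvBClause pos s cl ++ pvBAll pos (s + PySem.List.len cl) t

lemma pv_flat_build (cs : List (List Int)) (k : Int) (acc0 : List (Int × Int)) :
    (PySem.List.enumerate cs k).foldl
      (fun acc ic => ic.2.foldl (fun acc2 lit => acc2 ++ [(ic.1, lit)]) acc) acc0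
    = acc0 ++ pvEnumFlat cs k := by
  induction cs generalizing k acc0 with
  | nil => simp [pvEnumFlat, PySem.List.enumerate_nil]
  | cons cl t ih =>
    rw [PySem.List.enumerate_cons]
    simp only [List.foldl_cons]
    rw [ih, PySem.List.foldl_append_singleton_eq_map]
    simp [pvEnumFlat]

lemma pv_pos_spec (flat : List (Int × Int)) (v : Int) :
    (((PySem.List.enumerate flat).foldl
        (fun d jp => d.modify jp.2.2 ([] : List Int) (fun l => l ++ [jp.1])) PySem.Dict.empty).getD v [])
    = (PySem.List.pyRange 0 (flat.length : Int) 1).filter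
        (fun j => decide ((PySem.List.pyGetD flat j ((0 : Int), (0 : Int))).2 = v)) := by
  rw [PySem.List.enumerate_eq_map_pyRange flat ((0 : Int), (0 : Int)), List.foldl_map]
  have h : (PySem.List.pyRange 0 (PySem.List.len flat) 1).foldl
      (fun d j => d.modify (PySem.List.pyGetD flat j ((0:Int),(0:Int))).2 ([] : List Int) (fun l => l ++ [j]))
      PySem.Dict.empty
      = (((PySem.List.pyRange 0 (PySem.List.len flat) 1).map
          (fun j => ((PySem.List.pyGetD flat j ((0:Int),(0:Int))).2, j))).foldl
        (fun d p => d.modify p.1 ([] : List Int) (fun l => l ++ [p.2])) PySem.Dict.empty) := by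
    rw [List.foldl_map]
  rw [h, PySem.Dict.getD_foldl_modify_append]
  rw [List.filter_map]
  simp [Function.comp_def]
  congr 1

lemma pv_a_edges (flat : List (Int × Int)) (m : Int) (acc : List (Int × Int)) :
    (PySem.List.pyRange 0 m 1).foldl (fun ed i =>
      (PySem.List.pyRange (i + 1) m 1).foldl (fun ed2 j =>
        let p1 := PySem.List.pyGetD flat i ((0 : Int), (0 : Int))
        let p2 := PySem.List.pyGetD flat j ((0 : Int), (0 : Int))
        let is_connected := if p1.1 = p2.1 then true else if p1.2 = -p2.2 then true else false
        if is_connected then ed2 ++ [(i + 1, j + 1)] else ed2) ed) acc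
    = acc ++ (PySem.List.pyRange 0 m 1).flatMap (pvAIn flat m) := by
  have hin : ∀ (i : Int) (ed : List (Int × Int)),
      (PySem.List.pyRange (i + 1) m 1).foldl (fun ed2 j =>
        let p1 := PySem.List.pyGetD flat i ((0 : Int), (0 : Int))
        let p2 := PySem.List.pyGetD flat j ((0 : Int), (0 : Int))
        let is_connected := if p1.1 = p2.1 then true else if p1.2 = -p2.2 then true else false
        if is_connected then ed2 ++ [(i + 1, j + 1)] else ed2) ed
      = ed ++ pvAIn flat m i := by
    intro i ed
    simpa [pvAIn, pvCond] using
      PySem.List.foldl_append_if (fun j => pvCond flat i j) (fun j => (i + 1, j + 1))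
        (PySem.List.pyRange (i + 1) m 1) ed
  calc (PySem.List.pyRange 0 m 1).foldl (fun ed i =>
      (PySem.List.pyRange (i + 1) m 1).foldl (fun ed2 j =>
        let p1 := PySem.List.pyGetD flat i ((0 : Int), (0 : Int))
        let p2 := PySem.List.pyGetD flat j ((0 : Int), (0 : Int))
        let is_connected := if p1.1 = p2.1 then true else if p1.2 = -p2.2 then true else false
        if is_connected then ed2 ++ [(i + 1, j + 1)] else ed2) ed) acc
      = (PySem.List.pyRange 0 m 1).foldl (fun ed i => ed ++ pvAIn flat m i) acc := by
        exact PySem.List.foldl_congr_mem _ _ _ _ (by intro ed i _; exact hin i ed)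
    _ = acc ++ (PySem.List.pyRange 0 m 1).flatMap (pvAIn flat m) :=
        PySem.List.foldl_append_eq_flatMap _ _ _

lemma pv_b_clause (pos : PySem.Dict Int (List Int)) (cl : List Int) (start : Int) (E : List (Int × Int)) :
    (PySem.List.pyRange 0 (PySem.List.len cl) 1).foldl (fun ed t =>
        let i := start + t
        let lit := PySem.List.pyGetD cl t 0
        let ed1 := (PySem.List.pyRange (i + 1) (start + PySem.List.len cl) 1).foldl
          (fun e j => e ++ [(i + 1, j + 1)]) ed
        (pos.getD (-lit) []).foldl
          (fun e j => if j ≥ start + PySem.List.len cl then e ++ [(i + 1, j + 1)] else e) ed1) E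
    = E ++ pvBClause pos start cl := by
  have hstep : ∀ (ed : List (Int × Int)) (t : Int),
      (let i := start + t
       let lit := PySem.List.pyGetD cl t 0
       let ed1 := (PySem.List.pyRange (i + 1) (start + PySem.List.len cl) 1).foldl
         (fun e j => e ++ [(i + 1, j + 1)]) ed
       (pos.getD (-lit) []).foldl
         (fun e j => if j ≥ start + PySem.List.len cl then e ++ [(i + 1, j + 1)] else e) ed1)
      = ed ++ ((PySem.List.pyRange (start + t + 1) (start + PySem.List.len cl) 1).map
            (fun j => (start + t + 1, j + 1)) ++
          ((pos.getD (-(PySem.List.pyGetD cl t 0)) []).filter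
              (fun j => decide (j ≥ start + PySem.List.len cl))).map
            (fun j => (start + t + 1, j + 1))) := by
    intro ed t
    simp only []
    rw [PySem.List.foldl_append_singleton_eq_map,
        PySem.List.foldl_append_ite (fun j => j ≥ start + PySem.List.len cl)
          (fun j => (start + t + 1, j + 1))]
    simp [List.append_assoc]
  calc _ = (PySem.List.pyRange 0 (PySem.List.len cl) 1).foldl (fun ed t =>
          ed ++ ((PySem.List.pyRange (start + t + 1) (start + PySem.List.len cl) 1).map
              (fun j => (start + t + 1, j + 1)) ++
            ((pos.getD (-(PySem.List.pyGetD cl t 0)) []).filter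
                (fun j => decide (j ≥ start + PySem.List.len cl))).map
              (fun j => (start + t + 1, j + 1)))) E :=
        PySem.List.foldl_congr_mem _ _ _ _ (by intro ed t _; exact hstep ed t)
    _ = E ++ pvBClause pos start cl := by
        rw [PySem.List.foldl_append_eq_flatMap]; rfl

lemma pv_b_fold (pos : PySem.Dict Int (List Int)) (cs : List (List Int)) (s0 : Int) (acc : List (Int × Int)) :
    (cs.foldl (fun se clause =>
      let start := se.1
      let endd := start + PySem.List.len clause
      let edges := (PySem.List.pyRange 0 (PySem.List.len clause) 1).foldl (fun ed t =>
        let i := start + t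
        let lit := PySem.List.pyGetD clause t 0
        let ed1 := (PySem.List.pyRange (i + 1) endd 1).foldl (fun e j => e ++ [(i + 1, j + 1)]) ed
        (pos.getD (-lit) []).foldl (fun e j => if j ≥ endd then e ++ [(i + 1, j + 1)] else e) ed1) se.2
      (endd, edges)) (s0, acc)).2
    = acc ++ pvBAll pos s0 cs := by
  induction cs generalizing s0 acc with
  | nil => simp [pvBAll]
  | cons cl t ih =>
    simp only [List.foldl_cons]
    rw [show (let start := (s0, acc).1
      let endd := start + PySem.List.len cl
      let edges := (PySem.List.pyRange 0 (PySem.List.len cl) 1).foldl (fun ed t =>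
        let i := start + t
        let lit := PySem.List.pyGetD cl t 0
        let ed1 := (PySem.List.pyRange (i + 1) endd 1).foldl (fun e j => e ++ [(i + 1, j + 1)]) ed
        (pos.getD (-lit) []).foldl (fun e j => if j ≥ endd then e ++ [(i + 1, j + 1)] else e) ed1) (s0, acc).2
      ((endd, edges) : Int × List (Int × Int)))
      = (s0 + PySem.List.len cl, acc ++ pvBClause pos s0 cl) from by
        simp only []
        rw [pv_b_clause]]
    rw [ih]
    simp [pvBAll]

lemma pv_range_filter_ge (m e : Int) (h0 : 0 ≤ e) (q : Int → Bool) :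
    (PySem.List.pyRange 0 m 1).filter (fun j => decide (e ≤ j) && q j)
    = (PySem.List.pyRange e m 1).filter q := by
  by_cases hem : e ≤ m
  · rw [PySem.List.pyRange_one_append 0 e m h0 hem, List.filter_append]
    have h1 : (PySem.List.pyRange 0 e 1).filter (fun j => decide (e ≤ j) && q j) = [] := by
      apply List.filter_eq_nil_iff.mpr
      intro j hj
      have := (PySem.List.mem_pyRange_one.mp hj).2
      simp [show ¬ (e ≤ j) by omega]
    have h2 : (PySem.List.pyRange e m 1).filter (fun j => decide (e ≤ j) && q j)
        = (PySem.List.pyRange e m 1).filter q := by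
      apply List.filter_congr
      intro j hj
      have := (PySem.List.mem_pyRange_one.mp hj).1
      simp [this]
    rw [h1, h2, List.nil_append]
  · rw [PySem.List.pyRange_one_eq_nil (by omega : m ≤ e)]
    simp only [List.filter_nil]
    apply List.filter_eq_nil_iff.mpr
    intro j hj
    have := (PySem.List.mem_pyRange_one.mp hj).2
    simp [show ¬ (e ≤ j) by omega]

lemma pv_flatMap_congr {α β : Type} (l : List α) (f g : α → List β)
    (h : ∀ a ∈ l, f a = g a) : l.flatMap f = l.flatMap g := by
  induction l with
  | nil => rfl
  | cons x t ih =>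
    simp only [List.flatMap_cons]
    rw [h x (by simp), ih (fun a ha => h a (by simp [ha]))]

lemma pv_enumFlat_mem_ge (cs : List (List Int)) (k : Int) (p : Int × Int)
    (hp : p ∈ pvEnumFlat cs k) : k ≤ p.1 := by
  induction cs generalizing k with
  | nil => simp [pvEnumFlat] at hp
  | cons cl t ih =>
    simp only [pvEnumFlat, List.mem_append, List.mem_map] at hp
    rcases hp with ⟨l, _, rfl⟩ | hp
    · rfl
    · have := ih (k + 1) hp; omega

lemma pv_per_index (F : List (Int × Int)) (cl : List Int) (tail : List (Int × Int))
    (k : Int) (tN : Nat) (htN : tN < cl.length)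
    (flat : List (Int × Int)) (hflat : flat = F ++ cl.map (fun l => (k, l)) ++ tail)
    (hhi : ∀ p ∈ tail, k < p.1)
    (pos : PySem.Dict Int (List Int))
    (hpos : ∀ v, pos.getD v [] = (PySem.List.pyRange 0 (flat.length : Int) 1).filter
        (fun j => decide ((PySem.List.pyGetD flat j ((0 : Int), (0 : Int))).2 = v))) :
    pvAIn flat (flat.length : Int) ((F.length : Int) + tN)
    = (PySem.List.pyRange ((F.length : Int) + tN + 1) ((F.length : Int) + cl.length) 1).map
        (fun j => ((F.length : Int) + tN + 1, j + 1))
      ++ ((pos.getD (-cl[tN]) []).filter (fun j => decide (j ≥ (F.length : Int) + cl.length))).map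
        (fun j => ((F.length : Int) + tN + 1, j + 1)) := by
  have hlen : flat.length = F.length + cl.length + tail.length := by
    subst hflat; simp; omega
  set s : Int := (F.length : Int) with hs
  set e : Int := s + cl.length with he
  set m : Int := (flat.length : Int) with hm
  have hem : e ≤ m := by rw [he, hm, hlen] ; push_cast ; omega
  -- getElem facts
  have f_get_mid : ∀ (t' : Nat) (ht' : t' < cl.length),
      PySem.List.pyGetD flat (s + t') ((0 : Int), (0 : Int)) = (k, cl[t']'(ht')) := by
    intro t' ht'
    rw [PySem.List.pyGetD_eq_getElem _ _ (by positivity) (by rw [hlen]; push_cast; omega)]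
    rw [List.getElem_eq_iff]
    have hidx : ((s : Int) + t').toNat = F.length + t' := by omega
    subst hflat
    rw [hidx, List.append_assoc, List.getElem?_append_right (by omega)]
    rw [List.getElem?_append_left (by simp; omega)]
    simp [List.getElem?_map, List.getElem?_eq_getElem ht']
  have f_mid1 : ∀ j : Int, s ≤ j → j < e →
      (PySem.List.pyGetD flat j ((0 : Int), (0 : Int))).1 = k := by
    intro j h1 h2
    have heq : j = s + ((j - s).toNat : Int) := by omega
    rw [heq, f_get_mid (j - s).toNat (by omega)]
  have f_hi : ∀ j : Int, e ≤ j → j < m →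
      k < (PySem.List.pyGetD flat j ((0 : Int), (0 : Int))).1 := by
    intro j h1 h2
    have hjm : j.toNat < flat.length := by omega
    rw [PySem.List.pyGetD_eq_getElem _ _ (by omega) (by exact_mod_cast h2)]
    have htl : j.toNat - (F.length + cl.length) < tail.length := by omega
    have hopt : flat[j.toNat]? = some (tail[j.toNat - (F.length + cl.length)]'htl) := by
      subst hflat
      rw [List.append_assoc, List.getElem?_append_right (by omega)]
      rw [List.getElem?_append_right (by simp; omega)]
      rw [show j.toNat - F.length - (List.map (fun l => (k, l)) cl).length
          = j.toNat - (F.length + cl.length) by simp; omega]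
      exact List.getElem?_eq_getElem htl
    have hval : flat[j.toNat]'hjm = tail[j.toNat - (F.length + cl.length)]'htl := by
      rw [List.getElem_eq_iff]
      exact hopt
    rw [hval]
    exact hhi _ (List.getElem_mem _)
  have hi_get : PySem.List.pyGetD flat (s + tN) ((0 : Int), (0 : Int)) = (k, cl[tN]) :=
    f_get_mid tN htN
  -- split the scan range
  rw [pvAIn,
      PySem.List.pyRange_one_append (s + tN + 1) e m (by rw [he]; omega) hem,
      List.filter_append]
  have hpart1 : (PySem.List.pyRange (s + tN + 1) e 1).filter (fun j => pvCond flat (s + tN) j)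
      = PySem.List.pyRange (s + tN + 1) e 1 := by
    apply List.filter_eq_self.mpr
    intro j hj
    obtain ⟨hj1, hj2⟩ := PySem.List.mem_pyRange_one.mp hj
    simp only [pvCond, hi_get]
    rw [f_mid1 j (by omega) hj2]
    simp
  have hpart2 : (PySem.List.pyRange e m 1).filter (fun j => pvCond flat (s + tN) j)
      = (PySem.List.pyRange e m 1).filter
          (fun j => decide ((PySem.List.pyGetD flat j ((0 : Int), (0 : Int))).2 = -cl[tN])) := by
    apply List.filter_congr
    intro j hj
    obtain ⟨hj1, hj2⟩ := PySem.List.mem_pyRange_one.mp hj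
    have hne := f_hi j hj1 hj2
    simp only [pvCond, hi_get]
    rw [if_neg (by omega)]
    by_cases hq : (PySem.List.pyGetD flat j ((0 : Int), (0 : Int))).2 = -cl[tN]
    · rw [if_pos (by omega), hq]; simp
    · rw [if_neg (by omega)]; simp [hq]
  have hposside : (pos.getD (-cl[tN]) []).filter (fun j => decide (j ≥ e))
      = (PySem.List.pyRange e m 1).filter
          (fun j => decide ((PySem.List.pyGetD flat j ((0 : Int), (0 : Int))).2 = -cl[tN])) := by
    rw [hpos, List.filter_filter, ← pv_range_filter_ge m e (by omega)]
  rw [hpart1, hpart2, List.map_append, ← hposside]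

lemma pv_main (cs : List (List Int)) (k : Int) (F : List (Int × Int))
    (flat : List (Int × Int)) (hflat : flat = F ++ pvEnumFlat cs k)
    (hlow : ∀ p ∈ F, p.1 < k)
    (pos : PySem.Dict Int (List Int))
    (hpos : ∀ v, pos.getD v [] = (PySem.List.pyRange 0 (flat.length : Int) 1).filter
        (fun j => decide ((PySem.List.pyGetD flat j ((0 : Int), (0 : Int))).2 = v))) :
    (PySem.List.pyRange (F.length : Int) (flat.length : Int) 1).flatMap (pvAIn flat (flat.length : Int))
    = pvBAll pos (F.length : Int) cs := by
  induction cs generalizing F k with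
  | nil =>
    have : flat = F := by simpa [pvEnumFlat] using hflat
    subst this
    rw [PySem.List.pyRange_one_eq_nil (le_refl _)]
    rfl
  | cons cl cs' ih =>
    have hflat' : flat = (F ++ cl.map (fun l => (k, l))) ++ pvEnumFlat cs' (k + 1) := by
      rw [hflat]; simp [pvEnumFlat]
    have hlow' : ∀ p ∈ F ++ cl.map (fun l => (k, l)), p.1 < k + 1 := by
      intro p hp
      rcases List.mem_append.mp hp with h | h
      · have := hlow p h; omega
      · obtain ⟨l, _, rfl⟩ := List.mem_map.mp h; omega
    have hIH := ih (k + 1) (F ++ cl.map (fun l => (k, l))) hflat' hlow'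
    have hlenF : ((F ++ cl.map (fun l => (k, l))).length : Int) = (F.length : Int) + cl.length := by
      simp
    have hm : ((F.length : Int) + cl.length) ≤ (flat.length : Int) := by
      rw [hflat']; simp
    rw [PySem.List.pyRange_one_append (F.length : Int) ((F.length : Int) + cl.length)
        (flat.length : Int) (by omega) hm, List.flatMap_append]
    have htail : (PySem.List.pyRange ((F.length : Int) + cl.length) (flat.length : Int) 1).flatMap
        (pvAIn flat (flat.length : Int)) = pvBAll pos ((F.length : Int) + cl.length) cs' := by
      rw [← hlenF]
      exact hIH
    rw [htail]
    have hhead : (PySem.List.pyRange (F.length : Int) ((F.length : Int) + cl.length) 1).flatMap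
        (pvAIn flat (flat.length : Int)) = pvBClause pos (F.length : Int) cl := by
      rw [PySem.List.pyRange_one, pvBClause, PySem.List.pyRange_one]
      have h1 : (((F.length : Int) + cl.length) - (F.length : Int)).toNat = cl.length := by omega
      have h2 : ((PySem.List.len cl) - 0).toNat = cl.length := by simp
      rw [h1, h2, List.flatMap_map, List.flatMap_map]
      apply pv_flatMap_congr
      intro tN htN
      have htN' : tN < cl.length := List.mem_range.mp htN
      have hper := pv_per_index F cl (pvEnumFlat cs' (k + 1)) k tN htN' flat
        (by rw [hflat]; simp [pvEnumFlat])
        (by intro p hp; have := pv_enumFlat_mem_ge cs' (k + 1) p hp; omega)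
        pos hpos
      show pvAIn flat (flat.length : Int) ((F.length : Int) + tN) = _
      rw [hper]
      have hlit : PySem.List.pyGetD cl ((0 : Int) + tN) 0 = cl[tN] := by
        rw [zero_add, PySem.List.pyGetD_natCast, List.getD_eq_getElem _ _ htN']
      rw [hlit]
      simp only [PySem.List.len_eq, zero_add]
      norm_num
    rw [hhead]
    rfl

-- ===== VERDICT (by name: the statement is the Claim_ definition above) =====
theorem reduce_to_independent_set_spec : Claim_equal_reduce_to_independent_set := by
  intro n c clauses _
  unfold Spec_reduce_to_independent_set reduce_to_independent_set reduce_to_independent_set_alt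
  simp only []
  rw [pv_flat_build clauses 0 []]
  simp only [List.nil_append, PySem.List.len_eq]
  have hmain := pv_main clauses 0 [] (pvEnumFlat clauses 0) (by simp) (by simp)
    ((PySem.List.enumerate (pvEnumFlat clauses 0)).foldl
      (fun d jp => d.modify jp.2.2 ([] : List Int) (fun l => l ++ [jp.1])) PySem.Dict.empty)
    (fun v => pv_pos_spec (pvEnumFlat clauses 0) v)
  simp only [List.length_nil, Nat.cast_zero] at hmain
  refine congrArg (Prod.mk (3 * c)) ?_
  refine Eq.trans (pv_a_edges (pvEnumFlat clauses 0) ((pvEnumFlat clauses 0).length : Int) []) ?_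
  refine Eq.trans ?_ (pv_b_fold ((PySem.List.enumerate (pvEnumFlat clauses 0)).foldl
      (fun d jp => d.modify jp.2.2 ([] : List Int) (fun l => l ++ [jp.1])) PySem.Dict.empty)
      clauses 0 []).symm
  simpa using hmain
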